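-- pv_equiv track=rewrite | github.com/bsuir-cesium/oaip-labs | lab-7/src/solve1.py | getTask1
-- ===== SOURCE A (Python) =====
-- def getTask1(s: str, lastWord: str, alphabet: str, delimiter: str = " ") -> str:
--     """Напечатать слова, отличные от последнего слова, если они
--     удовлетворяют следующему условию: слово совпадает
--     с конечным отрезком латинского алфавита (z, yz, xyz и т.д.).
--     """
--
--     resultStr: str = ""
--     tempStr: str = ""
--     for i in range(len(s)):
--         if s[i] != " ":
--             tempStr += s[i]
--         else:
--             if not (tempStr == lastWord):
--                 index = alphabet.find(tempStr)
--                 if (index != -1) and (alphabet[index:] == tempStr):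
--                     resultStr += alphabet[index:]
--             resultStr += delimiter
--             tempStr = ""
--
--     return resultStr
-- ===== SOURCE B (Python) =====
-- def getTask1(s: str, lastWord: str, alphabet: str, delimiter: str = " ") -> str:
--     result = ""
--     for word in s.split(" ")[:-1]:
--         if word != lastWord:
--             index = alphabet.find(word)
--             if index != -1 and alphabet[index:] == word:
--                 result += alphabet[index:]
--         result += delimiter
--     return result
-- ===== Notes on version B (the rewrite author's own statement) =====
-- stated objective: idiomatic
-- what changed: Replaced the character-by-character buffer-building state machine with a word-level pass: split the string on spaces once, drop the trailing unterminated segment, and process whole words.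
import Mathlib
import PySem

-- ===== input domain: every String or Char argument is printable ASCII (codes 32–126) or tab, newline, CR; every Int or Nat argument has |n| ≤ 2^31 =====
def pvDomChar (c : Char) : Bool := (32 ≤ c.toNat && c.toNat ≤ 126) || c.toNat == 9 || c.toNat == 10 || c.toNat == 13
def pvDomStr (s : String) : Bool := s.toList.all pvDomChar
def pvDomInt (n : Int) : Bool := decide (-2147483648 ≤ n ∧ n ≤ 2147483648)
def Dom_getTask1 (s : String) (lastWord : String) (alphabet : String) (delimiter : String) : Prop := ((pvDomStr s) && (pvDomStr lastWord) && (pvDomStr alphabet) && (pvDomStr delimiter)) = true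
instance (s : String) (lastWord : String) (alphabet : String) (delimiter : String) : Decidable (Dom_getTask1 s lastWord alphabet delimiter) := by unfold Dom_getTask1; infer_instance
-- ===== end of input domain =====

-- B replaces A's character-by-character buffer state machine by a split-on-space word-level pass (idiomatic; same return value).

-- ===== PORT A =====
-- A's loop over the characters of s, carrying (tempStr, resultStr).
def getTask1_loop (lastWord : String) (alphabet : String) (delimiter : String) :
    List Char → String → String → String
  | [], _temp, res => res
  | c :: cs, temp, res =>
    if c ≠ ' ' then
      getTask1_loop lastWord alphabet delimiter cs (temp.push c) res
    else
      let res1 :=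
        if ¬ (temp = lastWord) then
          let index := PySem.Str.find alphabet temp
          if index ≠ -1 ∧ PySem.Str.slice alphabet (some index) none = temp then
            res ++ PySem.Str.slice alphabet (some index) none
          else res
        else res
      getTask1_loop lastWord alphabet delimiter cs "" (res1 ++ delimiter)

def getTask1 (s : String) (lastWord : String) (alphabet : String) (delimiter : String) : String :=
  getTask1_loop lastWord alphabet delimiter s.toList "" ""

-- ===== PORT B =====
def getTask1_alt (s : String) (lastWord : String) (alphabet : String) (delimiter : String) : String :=
  let parts := (PySem.Str.split? s " ").getD []
  (PySem.List.slice parts none (some (-1))).foldl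
    (fun result word =>
      (if word ≠ lastWord then
        let index := PySem.Str.find alphabet word
        if index ≠ -1 ∧ PySem.Str.slice alphabet (some index) none = word then
          result ++ PySem.Str.slice alphabet (some index) none
        else result
      else result) ++ delimiter) ""

-- ===== PRECONDITION & SPEC =====
def Spec_getTask1 (s : String) (lastWord : String) (alphabet : String) (delimiter : String) (out : String) : Prop := out = getTask1_alt s lastWord alphabet delimiter
instance (s : String) (lastWord : String) (alphabet : String) (delimiter : String) (out : String) : Decidable (Spec_getTask1 s lastWord alphabet delimiter out) := by unfold Spec_getTask1; infer_instance

-- ===== CLAIM (what is proved, stated in full; the proofs are below) =====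
def Claim_equal_getTask1 : Prop := ∀ (s : String) (lastWord : String) (alphabet : String) (delimiter : String), Dom_getTask1 s lastWord alphabet delimiter → Spec_getTask1 s lastWord alphabet delimiter (getTask1 s lastWord alphabet delimiter)

-- ===== LEMMAS AND PROOFS =====

-- Word action shared (provably) by both loop bodies, as a String function.
def pvF (lastWord alphabet : String) (w : String) : String :=
  if ¬ (w = lastWord) then
    let index := PySem.Str.find alphabet w
    if index ≠ -1 ∧ PySem.Str.slice alphabet (some index) none = w then
      PySem.Str.slice alphabet (some index) none
    else ""
  else ""

-- split of a char list on a single space, keeping empty pieces (Python split(" ")).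
def pvSplit : List Char → List (List Char)
  | [] => [[]]
  | c :: cs =>
    if c = ' ' then [] :: pvSplit cs
    else
      match pvSplit cs with
      | [] => [[c]]        -- unreachable: pvSplit is never []
      | w :: ws => (c :: w) :: ws

def pvConsHead (t : List Char) : List (List Char) → List (List Char)
  | [] => [t]
  | w :: ws => (t ++ w) :: ws

-- emit with one-word lookahead: drop the last (unterminated) word.
def pvEmit (lastWord alphabet delimiter : String) : List (List Char) → List Char
  | [] => []
  | [_] => []
  | w :: w2 :: ws =>
    (pvF lastWord alphabet (String.ofList w)).toList ++ delimiter.toList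
      ++ pvEmit lastWord alphabet delimiter (w2 :: ws)

def pvEmitAll (lastWord alphabet delimiter : String) : List (List Char) → List Char
  | [] => []
  | w :: ws =>
    (pvF lastWord alphabet (String.ofList w)).toList ++ delimiter.toList
      ++ pvEmitAll lastWord alphabet delimiter ws

theorem pvSplit_ne_nil (cs : List Char) : pvSplit cs ≠ [] := by
  cases cs with
  | nil => simp [pvSplit]
  | cons c cs =>
    simp only [pvSplit]
    split
    · simp
    · cases h : pvSplit cs <;> simp

theorem pvEmit_eq_emitAll_dropLast (lw al dl : String) (l : List (List Char)) :
    pvEmit lw al dl l = pvEmitAll lw al dl l.dropLast := by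
  induction l with
  | nil => rfl
  | cons w ws ih =>
    cases ws with
    | nil => rfl
    | cons w2 ws' =>
      simp only [pvEmit, pvEmitAll, List.dropLast_cons₂, ih]

theorem pvGo_space (fuel : Nat) (l cur : List Char) (acc : List (List Char))
    (h : l.length ≤ fuel) :
    PySem.Chars.splitOn.go [' '] fuel l cur acc
      = acc.reverse ++ pvConsHead cur.reverse (pvSplit l) := by
  induction fuel generalizing l cur acc with
  | zero =>
    have : l = [] := by
      cases l with
      | nil => rfl
      | cons c cs => simp at h
    subst this
    simp [PySem.Chars.splitOn.go, pvSplit, pvConsHead]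
  | succ f ih =>
    cases l with
    | nil => simp [PySem.Chars.splitOn.go, pvSplit, pvConsHead]
    | cons c cs =>
      have hcs : cs.length ≤ f := by simpa using h
      by_cases hc : c = ' '
      · subst hc
        rw [show PySem.Chars.splitOn.go [' '] (f+1) (' ' :: cs) cur acc
              = PySem.Chars.splitOn.go [' '] f cs [] (cur.reverse :: acc) by
            simp [PySem.Chars.splitOn.go, List.isPrefixOf]]
        rw [ih cs [] (cur.reverse :: acc) hcs]
        obtain ⟨w, ws, hws⟩ : ∃ w ws, pvSplit cs = w :: ws := by
          cases h' : pvSplit cs with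
          | nil => exact absurd h' (pvSplit_ne_nil cs)
          | cons w ws => exact ⟨w, ws, rfl⟩
        simp [pvSplit, hws, pvConsHead]
      · have hpre : List.isPrefixOf [' '] (c :: cs) = false := by
          simp [List.isPrefixOf, Ne.symm hc]
        rw [show PySem.Chars.splitOn.go [' '] (f+1) (c :: cs) cur acc
              = PySem.Chars.splitOn.go [' '] f cs (c :: cur) acc by
            simp [PySem.Chars.splitOn.go, hpre]]
        rw [ih cs (c :: cur) acc hcs]
        obtain ⟨w, ws, hws⟩ : ∃ w ws, pvSplit cs = w :: ws := by
          cases h' : pvSplit cs with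
          | nil => exact absurd h' (pvSplit_ne_nil cs)
          | cons w ws => exact ⟨w, ws, rfl⟩
        simp [pvSplit, hws, pvConsHead, hc]

theorem pvSplitOn_space (cs : List Char) :
    PySem.Chars.splitOn cs [' '] = pvSplit cs := by
  rw [PySem.Chars.splitOn, pvGo_space (cs.length + 1) cs [] [] (by omega)]
  obtain ⟨w, ws, hws⟩ : ∃ w ws, pvSplit cs = w :: ws := by
    cases h' : pvSplit cs with
    | nil => exact absurd h' (pvSplit_ne_nil cs)
    | cons w ws => exact ⟨w, ws, rfl⟩
  simp [hws, pvConsHead]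

-- The invariant of A's character loop.
theorem pvLoop_eq (lw al dl : String) (cs : List Char) (temp res : String) :
    (getTask1_loop lw al dl cs temp res).toList
      = res.toList ++ pvEmit lw al dl (pvConsHead temp.toList (pvSplit cs)) := by
  induction cs generalizing temp res with
  | nil => simp [getTask1_loop, pvSplit, pvConsHead, pvEmit]
  | cons c cs ih =>
    obtain ⟨w, ws, hws⟩ : ∃ w ws, pvSplit cs = w :: ws := by
      cases h' : pvSplit cs with
      | nil => exact absurd h' (pvSplit_ne_nil cs)
      | cons w ws => exact ⟨w, ws, rfl⟩
    by_cases hc : c = ' '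
    · subst hc
      rw [show getTask1_loop lw al dl (' ' :: cs) temp res
            = getTask1_loop lw al dl cs ""
                ((if ¬ (temp = lw) then
                    let index := PySem.Str.find al temp
                    if index ≠ -1 ∧ PySem.Str.slice al (some index) none = temp then
                      res ++ PySem.Str.slice al (some index) none
                    else res
                  else res) ++ dl) by
          simp [getTask1_loop]]
      rw [ih]
      have hbody : ((if ¬ (temp = lw) then
                    let index := PySem.Str.find al temp
                    if index ≠ -1 ∧ PySem.Str.slice al (some index) none = temp then
                      res ++ PySem.Str.slice al (some index) none
                    else res
                  else res) ++ dl).toList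
          = res.toList ++ (pvF lw al temp).toList ++ dl.toList := by
        simp only [pvF]
        split_ifs <;> simp
      rw [hbody]
      have hofl : String.ofList temp.toList = temp := by simp
      simp [pvSplit, hws, pvConsHead, pvEmit, hofl]
    · rw [show getTask1_loop lw al dl (c :: cs) temp res
            = getTask1_loop lw al dl cs (temp.push c) res by
          simp [getTask1_loop, hc]]
      rw [ih]
      simp [pvSplit, hws, pvConsHead, hc, String.toList_push]

-- The invariant of B's fold over the word list.
theorem pvFold_eq (lw al dl : String) (parts : List String) (res : String) :
    (parts.foldl
      (fun result word =>
        (if word ≠ lw then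
          let index := PySem.Str.find al word
          if index ≠ -1 ∧ PySem.Str.slice al (some index) none = word then
            result ++ PySem.Str.slice al (some index) none
          else result
        else result) ++ dl) res).toList
      = res.toList ++ pvEmitAll lw al dl (parts.map String.toList) := by
  induction parts generalizing res with
  | nil => simp [pvEmitAll]
  | cons w ps ih =>
    rw [List.foldl_cons, ih]
    have hbody : ((if w ≠ lw then
          let index := PySem.Str.find al w
          if index ≠ -1 ∧ PySem.Str.slice al (some index) none = w then
            res ++ PySem.Str.slice al (some index) none
          else res
        else res) ++ dl).toList
        = res.toList ++ (pvF lw al w).toList ++ dl.toList := by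
      simp only [pvF]
      split_ifs <;> simp_all
    have hofl : String.ofList w.toList = w := by simp
    rw [hbody]
    simp [List.map_cons, pvEmitAll, hofl, List.append_assoc]

theorem pvParts_eq (s : String) :
    ∃ parts : List String, PySem.Str.split? s " " = some parts ∧
      parts.map String.toList = pvSplit s.toList := by
  have h := PySem.Str.split?_map s " "
  rw [show (" " : String).toList = [' '] by rfl] at h
  rw [PySem.Chars.split?] at h
  cases hsp : PySem.Str.split? s " " with
  | none => rw [hsp] at h; simp at h
  | some parts =>
    rw [hsp] at h
    simp at h
    rw [pvSplitOn_space] at h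
    exact ⟨parts, rfl, h⟩

-- ===== VERDICT (by name: the statement is the Claim_ definition above) =====
theorem getTask1_spec : Claim_equal_getTask1 := by
  intro s lw al dl _hdom
  unfold Spec_getTask1 getTask1 getTask1_alt
  obtain ⟨parts, hsp, hmap⟩ := pvParts_eq s
  rw [hsp]
  rw [← String.toList_inj]
  rw [pvLoop_eq]
  simp only [Option.getD_some, PySem.List.slice_to_neg_one]
  rw [pvFold_eq]
  rw [List.map_dropLast, hmap]
  rw [← pvEmit_eq_emitAll_dropLast]
  obtain ⟨w, ws, hws⟩ : ∃ w ws, pvSplit s.toList = w :: ws := by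
    cases h' : pvSplit s.toList with
    | nil => exact absurd h' (pvSplit_ne_nil s.toList)
    | cons w ws => exact ⟨w, ws, rfl⟩
  simp [hws, pvConsHead]
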